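-- pv_equiv track=rewrite | github.com/Shaharafat/Problem-Solving | codeforces/soldier_and_bananas.py | calculate
-- ===== SOURCE A (Python) =====
-- def calculate(k, n, w):
--     total_cost = 0
--     for i in range(w):
--         total_cost += k * (i + 1)
--
--     if total_cost > n:
--         return total_cost - n
--     else:
--         return 0
-- ===== SOURCE B (Python) =====
-- def calculate(k, n, w):
--     m = max(w, 0)
--     # Gauss closed form, split by parity so each // is exact
--     tri = m // 2 * (m + 1) if m % 2 == 0 else (m + 1) // 2 * m
--     return max(k * tri - n, 0)
-- ===== Notes on version B (the rewrite author's own statement) =====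
-- stated objective: faster
-- what changed: Replaces the O(w) accumulation loop with the parity-split Gauss closed form (m//2*(m+1) or (m+1)//2*m) and a max() instead of the branch.
import Mathlib
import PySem

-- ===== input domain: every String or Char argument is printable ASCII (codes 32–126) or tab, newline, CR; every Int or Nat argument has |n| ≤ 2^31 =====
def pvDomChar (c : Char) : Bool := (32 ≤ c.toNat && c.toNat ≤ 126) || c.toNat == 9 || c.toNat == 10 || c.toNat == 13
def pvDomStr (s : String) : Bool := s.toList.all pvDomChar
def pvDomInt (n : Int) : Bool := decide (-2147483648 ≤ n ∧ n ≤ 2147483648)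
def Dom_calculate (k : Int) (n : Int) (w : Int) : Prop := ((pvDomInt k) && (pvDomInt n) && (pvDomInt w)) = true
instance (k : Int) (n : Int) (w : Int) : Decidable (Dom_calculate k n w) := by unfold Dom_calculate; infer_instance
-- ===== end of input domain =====

-- B replaces A's O(w) accumulation loop with the parity-split Gauss closed form and max() (faster, asymptotic).

-- ===== PORT A =====
def calculate (k : Int) (n : Int) (w : Int) : Int :=
  let total_cost := (PySem.List.pyRange 0 w 1).foldl (fun acc i => acc + k * (i + 1)) 0
  if total_cost > n then total_cost - n else 0

-- ===== PORT B =====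
def calculate_alt (k : Int) (n : Int) (w : Int) : Int :=
  let m := max w 0
  let tri := if PySem.Int.mod m 2 = 0 then PySem.Int.floordiv m 2 * (m + 1)
             else PySem.Int.floordiv (m + 1) 2 * m
  max (k * tri - n) 0

-- ===== PRECONDITION & SPEC =====
def Spec_calculate (k : Int) (n : Int) (w : Int) (out : Int) : Prop := out = calculate_alt k n w
instance (k : Int) (n : Int) (w : Int) (out : Int) : Decidable (Spec_calculate k n w out) := by unfold Spec_calculate; infer_instance

-- ===== CLAIM (what is proved, stated in full; the proofs are below) =====
def Claim_equal_calculate : Prop := ∀ (k : Int) (n : Int) (w : Int), Dom_calculate k n w → Spec_calculate k n w (calculate k n w)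

-- ===== LEMMAS AND PROOFS =====

theorem pv_tri_step (N : Nat) : (N + 1) * (N + 2) / 2 = N * (N + 1) / 2 + (N + 1) := by
  obtain ⟨c, hc⟩ := Nat.even_mul_succ_self N
  have h : (N + 1) * (N + 2) = N * (N + 1) + 2 * (N + 1) := by ring
  omega

theorem pv_sum_loop (k : Int) (N : Nat) (init : Int) :
    (PySem.List.pyRange 0 (N : Int) 1).foldl (fun acc i => acc + k * (i + 1)) init
      = init + k * ((N * (N + 1) / 2 : Nat) : Int) := by
  induction N generalizing init with
  | zero => simp [PySem.List.pyRange_one_eq_nil]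
  | succ m ih =>
    have hsplit := PySem.List.pyRange_one_succ_right (a := 0) (b := (m : Int)) (by exact_mod_cast Nat.zero_le m)
    rw [show ((m + 1 : Nat) : Int) = (m : Int) + 1 by push_cast; ring, hsplit,
        List.foldl_append, ih]
    simp only [List.foldl_cons, List.foldl_nil, pv_tri_step]
    push_cast
    ring

theorem pv_tri_closed (N : Nat) :
    (if PySem.Int.mod (N : Int) 2 = 0 then PySem.Int.floordiv (N : Int) 2 * ((N : Int) + 1)
     else PySem.Int.floordiv ((N : Int) + 1) 2 * (N : Int))
      = ((N * (N + 1) / 2 : Nat) : Int) := by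
  have hfd : ∀ M : Nat, PySem.Int.floordiv (M : Int) 2 = ((M / 2 : Nat) : Int) := by
    intro M
    rw [PySem.Int.floordiv_eq_ediv_of_pos (by norm_num)]
    omega
  have hmod : PySem.Int.mod (N : Int) 2 = ((N % 2 : Nat) : Int) := by
    rw [PySem.Int.mod_eq_emod_of_pos (by norm_num)]
    omega
  rw [hmod, show ((N : Int) + 1) = ((N + 1 : Nat) : Int) by push_cast; ring, hfd, hfd]
  by_cases h : N % 2 = 0
  · rw [if_pos (by exact_mod_cast h)]
    obtain ⟨q, rfl⟩ : ∃ q, N = 2 * q := ⟨N / 2, by omega⟩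
    have h1 : (2 * q) / 2 = q := by omega
    have : (2 * q) / 2 * (2 * q + 1) = 2 * q * (2 * q + 1) / 2 := by
      rw [h1, Nat.mul_assoc, Nat.mul_div_cancel_left _ (by norm_num : 0 < 2)]
    exact_mod_cast this
  · rw [if_neg (by
      intro hc2
      exact h (by exact_mod_cast hc2))]
    obtain ⟨q, rfl⟩ : ∃ q, N = 2 * q + 1 := ⟨N / 2, by omega⟩
    have h1 : (2 * q + 1 + 1) / 2 = q + 1 := by omega
    have h2 : (2 * q + 1) * (2 * q + 1 + 1) = 2 * ((q + 1) * (2 * q + 1)) := by ring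
    have : (2 * q + 1 + 1) / 2 * (2 * q + 1) = (2 * q + 1) * (2 * q + 1 + 1) / 2 := by
      rw [h1, h2, Nat.mul_div_cancel_left _ (by norm_num : 0 < 2)]
    exact_mod_cast this

-- ===== VERDICT (by name: the statement is the Claim_ definition above) =====
theorem calculate_spec : Claim_equal_calculate := by
  intro k n w _
  unfold Spec_calculate calculate calculate_alt
  by_cases hw : w > 0
  · have hm : max w 0 = ((w.toNat : Nat) : Int) := by omega
    have hN : PySem.List.pyRange 0 w 1 = PySem.List.pyRange 0 ((w.toNat : Nat) : Int) 1 := by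
      rw [Int.toNat_of_nonneg (by omega)]
    simp only [hm, pv_tri_closed, hN, pv_sum_loop, zero_add]
    omega
  · have hr : PySem.List.pyRange 0 w 1 = [] := PySem.List.pyRange_one_eq_nil (by omega)
    have hm : max w 0 = 0 := by omega
    simp only [hr, List.foldl_nil, hm]
    norm_num [PySem.Int.mod, PySem.Int.floordiv]
    omega
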